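-- pv_equiv track=rewrite | github.com/Alien-kh/SSAFY_with_me | kh_Jo/week_2/space_ship_swea2.py | solve
-- ===== SOURCE A (Python) =====
-- def solve(n, m, arr):
--     dr = [-1,-1,-1,0,1,1,1,0] # 맨 왼쪽 위 부터 시계 방향
--     dc = [-1,0,1,1,1,0,-1,-1]
--     total_count = 0 # 착률할 수 있는 지점 수
--     for r in range(n):
--         for c in range(m):
--             count = 0 # 촬영 가능한 수 세기
--             v = arr[r][c] # 현재 착륙한 지점
--             for d in range(8): # 8방향 탐색
--                 nr = r +dr[d]
--                 nc = c +dc[d]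
--                 if 0 <= nr < n and 0 <= nc <m and v > arr[nr][nc]: # v보다 작고, arr범위 안에 있으면
--                         count +=1 # 촬영 가능 한 수 up
--             if count>= 4: # 만약 4곳이상이면
--                 total_count+=1 # 착륙장소 up
--     return total_count
-- ===== SOURCE B (Python) =====
-- def solve(n, m, arr):
--     if n <= 0 or m <= 0:
--         return 0
--     counts = [[0 for _ in range(m)] for _ in range(n)]
--     for d in [(-1, -1), (-1, 0), (-1, 1), (0, 1), (1, 1), (1, 0), (1, -1), (0, -1)]:
--         counts = [[counts[r][c]
--                    + (1 if 0 <= r + d[0] < n and 0 <= c + d[1] < m and arr[r][c] > arr[r + d[0]][c + d[1]] else 0)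
--                    for c in range(m)]
--                   for r in range(n)]
--     total = 0
--     for row in counts:
--         for x in row:
--             if x >= 4:
--                 total += 1
--     return total
-- ===== Notes on version B (the rewrite author's own statement) =====
-- stated objective: alternative
-- what changed: B hoists the 8-direction loop to the outside: it maintains an n*m count matrix, rebuilt by one full sweep per direction, and then thresholds the matrix in a final pass, instead of A's per-cell inner loop over the 8 neighbours.
import Mathlib
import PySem

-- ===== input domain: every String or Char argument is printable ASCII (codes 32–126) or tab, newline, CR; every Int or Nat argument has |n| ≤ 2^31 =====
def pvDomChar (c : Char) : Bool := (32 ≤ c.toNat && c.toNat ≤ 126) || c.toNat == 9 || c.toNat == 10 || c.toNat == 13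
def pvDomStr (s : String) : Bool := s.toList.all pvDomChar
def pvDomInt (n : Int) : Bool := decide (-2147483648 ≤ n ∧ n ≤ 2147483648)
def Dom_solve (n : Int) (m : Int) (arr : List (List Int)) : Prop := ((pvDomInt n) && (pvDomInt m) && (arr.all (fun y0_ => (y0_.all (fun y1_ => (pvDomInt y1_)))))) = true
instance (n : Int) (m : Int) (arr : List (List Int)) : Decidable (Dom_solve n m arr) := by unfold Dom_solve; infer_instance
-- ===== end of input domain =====

-- B hoists the direction loop outside: one grid sweep per direction maintaining a count matrix,
-- then a final thresholding pass (objective: alternative decomposition, same O(n*m) cost).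

-- ===== PORT A =====
-- literal transliteration of A: nested r/c loops, per-cell inner loop over d in range(8)
def solve (n : Int) (m : Int) (arr : List (List Int)) : Int :=
  let dr : List Int := [-1, -1, -1, 0, 1, 1, 1, 0]
  let dc : List Int := [-1, 0, 1, 1, 1, 0, -1, -1]
  (PySem.List.pyRange 0 n 1).foldl (fun total_count r =>
    (PySem.List.pyRange 0 m 1).foldl (fun total_count c =>
      let v := PySem.List.pyGetD (PySem.List.pyGetD arr r []) c 0
      let count := (PySem.List.pyRange 0 8 1).foldl (fun count d =>
        let nr := r + PySem.List.pyGetD dr d 0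
        let nc := c + PySem.List.pyGetD dc d 0
        if 0 ≤ nr ∧ nr < n ∧ 0 ≤ nc ∧ nc < m ∧
            v > PySem.List.pyGetD (PySem.List.pyGetD arr nr []) nc 0 then count + 1 else count) (0 : Int)
      if count ≥ 4 then total_count + 1 else total_count) total_count) 0

-- ===== PORT B =====
-- B-side helper: the per-direction full sweep that rebuilds the count matrix (one loop body of Source B)
def sweepB (n : Int) (m : Int) (arr : List (List Int)) (counts : List (List Int)) (d : Int × Int) : List (List Int) :=
  (PySem.List.pyRange 0 n 1).map (fun r =>
    (PySem.List.pyRange 0 m 1).map (fun c =>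
      PySem.List.pyGetD (PySem.List.pyGetD counts r []) c 0 +
        (if 0 ≤ r + d.1 ∧ r + d.1 < n ∧ 0 ≤ c + d.2 ∧ c + d.2 < m ∧
            PySem.List.pyGetD (PySem.List.pyGetD arr r []) c 0 >
              PySem.List.pyGetD (PySem.List.pyGetD arr (r + d.1) []) (c + d.2) 0 then 1 else 0)))

def solve_alt (n : Int) (m : Int) (arr : List (List Int)) : Int :=
  if n ≤ 0 ∨ m ≤ 0 then 0
  else
    let counts0 : List (List Int) :=
      (PySem.List.pyRange 0 n 1).map (fun _ => (PySem.List.pyRange 0 m 1).map (fun _ => (0 : Int)))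
    let counts :=
      ([(-1, -1), (-1, 0), (-1, 1), (0, 1), (1, 1), (1, 0), (1, -1), (0, -1)] : List (Int × Int)).foldl
        (sweepB n m arr) counts0
    counts.foldl (fun total row =>
      row.foldl (fun total x => if x ≥ 4 then total + 1 else total) total) 0

-- ===== PRECONDITION & SPEC =====
-- Pre_ excludes exactly the inputs on which Python A raises IndexError: when both loops run
-- (0 < n and 0 < m) the first n rows of arr must exist and each have at least m entries.
def Pre_solve (n : Int) (m : Int) (arr : List (List Int)) : Prop :=
  0 < n → 0 < m → (n ≤ (arr.length : Int) ∧ ∀ row ∈ arr.take n.toNat, m ≤ (row.length : Int))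
instance (n : Int) (m : Int) (arr : List (List Int)) : Decidable (Pre_solve n m arr) := by
  unfold Pre_solve; infer_instance
def pvWitness_solve : Int × Int × List (List Int) := (2, 2, [[5, 1], [1, 1]])
def Spec_solve (n : Int) (m : Int) (arr : List (List Int)) (out : Int) : Prop := out = solve_alt n m arr
instance (n : Int) (m : Int) (arr : List (List Int)) (out : Int) : Decidable (Spec_solve n m arr out) := by
  unfold Spec_solve; infer_instance

-- ===== CLAIM (what is proved, stated in full; the proofs are below) =====
def Claim_equal_solve : Prop := ∀ (n : Int) (m : Int) (arr : List (List Int)), Dom_solve n m arr → Pre_solve n m arr → Spec_solve n m arr (solve n m arr)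

-- ===== LEMMAS AND PROOFS =====
def pvGrid (n m : Int) (g : Int → Int → Int) : List (List Int) :=
  (PySem.List.pyRange 0 n 1).map (fun r => (PySem.List.pyRange 0 m 1).map (fun c => g r c))

def pvInd (n m : Int) (arr : List (List Int)) (d : Int × Int) (r c : Int) : Int :=
  if 0 ≤ r + d.1 ∧ r + d.1 < n ∧ 0 ≤ c + d.2 ∧ c + d.2 < m ∧
      PySem.List.pyGetD (PySem.List.pyGetD arr r []) c 0 >
        PySem.List.pyGetD (PySem.List.pyGetD arr (r + d.1) []) (c + d.2) 0 then 1 else 0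

lemma pvGrid_get (n m : Int) (g : Int → Int → Int) (r c : Int)
    (hr0 : 0 ≤ r) (hrn : r < n) (hc0 : 0 ≤ c) (hcm : c < m) :
    PySem.List.pyGetD (PySem.List.pyGetD (pvGrid n m g) r []) c 0 = g r c := by
  unfold pvGrid
  rw [PySem.List.pyGetD_map_pyRange_of_nonneg _ n r _ hr0 hrn,
      PySem.List.pyGetD_map_pyRange_of_nonneg _ m c _ hc0 hcm]

lemma sweepB_grid (n m : Int) (arr : List (List Int)) (g : Int → Int → Int) (d : Int × Int) :
    sweepB n m arr (pvGrid n m g) d = pvGrid n m (fun r c => g r c + pvInd n m arr d r c) := by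
  conv_rhs => unfold pvGrid
  unfold sweepB
  refine List.map_congr_left (fun r hr => ?_)
  rw [PySem.List.mem_pyRange_one] at hr
  refine List.map_congr_left (fun c hc => ?_)
  rw [PySem.List.mem_pyRange_one] at hc
  simp only [pvInd]
  rw [pvGrid_get n m g r c hr.1 hr.2 hc.1 hc.2]

lemma foldl_sweepB (n m : Int) (arr : List (List Int)) (dirs : List (Int × Int)) (g : Int → Int → Int) :
    dirs.foldl (sweepB n m arr) (pvGrid n m g)
      = pvGrid n m (fun r c => g r c + (dirs.map (fun d => pvInd n m arr d r c)).sum) := by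
  induction dirs generalizing g with
  | nil => simp [pvGrid]
  | cons d ds ih =>
    rw [List.foldl_cons, sweepB_grid, ih]
    congr 1; funext r; funext c
    simp only [List.map_cons, List.sum_cons]; ring

lemma foldl_sweepB0 (n m : Int) (arr : List (List Int)) (dirs : List (Int × Int)) :
    dirs.foldl (sweepB n m arr) (pvGrid n m (fun _ _ => 0))
      = pvGrid n m (fun r c => 0 + (dirs.map (fun d => pvInd n m arr d r c)).sum) := by
  rw [foldl_sweepB]

lemma ite_add_one (P : Prop) [Decidable P] (x : Int) :
    (if P then x + 1 else x) = x + (if P then 1 else 0) := by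
  split_ifs <;> ring

lemma cell_count_eq (n m : Int) (arr : List (List Int)) (r c : Int) :
    (PySem.List.pyRange 0 8 1).foldl (fun count d =>
        if 0 ≤ r + PySem.List.pyGetD ([-1, -1, -1, 0, 1, 1, 1, 0] : List Int) d 0 ∧
            r + PySem.List.pyGetD ([-1, -1, -1, 0, 1, 1, 1, 0] : List Int) d 0 < n ∧
            0 ≤ c + PySem.List.pyGetD ([-1, 0, 1, 1, 1, 0, -1, -1] : List Int) d 0 ∧
            c + PySem.List.pyGetD ([-1, 0, 1, 1, 1, 0, -1, -1] : List Int) d 0 < m ∧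
            PySem.List.pyGetD (PySem.List.pyGetD arr r []) c 0 >
              PySem.List.pyGetD
                (PySem.List.pyGetD arr (r + PySem.List.pyGetD ([-1, -1, -1, 0, 1, 1, 1, 0] : List Int) d 0) [])
                (c + PySem.List.pyGetD ([-1, 0, 1, 1, 1, 0, -1, -1] : List Int) d 0) 0
          then count + 1 else count) 0
      = 0 + (([(-1, -1), (-1, 0), (-1, 1), (0, 1), (1, 1), (1, 0), (1, -1), (0, -1)] : List (Int × Int)).map
          (fun d => pvInd n m arr d r c)).sum := by
  have h8 : PySem.List.pyRange 0 8 1 = [0, 1, 2, 3, 4, 5, 6, 7] := by decide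
  rw [h8]
  simp only [List.foldl_cons, List.foldl_nil, List.map_cons, List.map_nil, List.sum_cons,
    List.sum_nil, pvInd]
  rw [show PySem.List.pyGetD ([-1,-1,-1,0,1,1,1,0] : List Int) 0 0 = -1 from by decide,
      show PySem.List.pyGetD ([-1,-1,-1,0,1,1,1,0] : List Int) 1 0 = -1 from by decide,
      show PySem.List.pyGetD ([-1,-1,-1,0,1,1,1,0] : List Int) 2 0 = -1 from by decide,
      show PySem.List.pyGetD ([-1,-1,-1,0,1,1,1,0] : List Int) 3 0 = 0 from by decide,
      show PySem.List.pyGetD ([-1,-1,-1,0,1,1,1,0] : List Int) 4 0 = 1 from by decide,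
      show PySem.List.pyGetD ([-1,-1,-1,0,1,1,1,0] : List Int) 5 0 = 1 from by decide,
      show PySem.List.pyGetD ([-1,-1,-1,0,1,1,1,0] : List Int) 6 0 = 1 from by decide,
      show PySem.List.pyGetD ([-1,-1,-1,0,1,1,1,0] : List Int) 7 0 = 0 from by decide,
      show PySem.List.pyGetD ([-1,0,1,1,1,0,-1,-1] : List Int) 0 0 = -1 from by decide,
      show PySem.List.pyGetD ([-1,0,1,1,1,0,-1,-1] : List Int) 1 0 = 0 from by decide,
      show PySem.List.pyGetD ([-1,0,1,1,1,0,-1,-1] : List Int) 2 0 = 1 from by decide,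
      show PySem.List.pyGetD ([-1,0,1,1,1,0,-1,-1] : List Int) 3 0 = 1 from by decide,
      show PySem.List.pyGetD ([-1,0,1,1,1,0,-1,-1] : List Int) 4 0 = 1 from by decide,
      show PySem.List.pyGetD ([-1,0,1,1,1,0,-1,-1] : List Int) 5 0 = 0 from by decide,
      show PySem.List.pyGetD ([-1,0,1,1,1,0,-1,-1] : List Int) 6 0 = -1 from by decide,
      show PySem.List.pyGetD ([-1,0,1,1,1,0,-1,-1] : List Int) 7 0 = -1 from by decide]
  simp only [ite_add_one]
  ring

lemma solve_spec_aux (n m : Int) (arr : List (List Int)) : solve n m arr = solve_alt n m arr := by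
  unfold solve solve_alt
  by_cases h : n ≤ 0 ∨ m ≤ 0
  · rw [if_pos h]
    rcases h with h | h
    · rw [PySem.List.pyRange_one_eq_nil h]
      rfl
    · simp only [PySem.List.pyRange_one_eq_nil h, List.foldl_nil]
      exact List.foldl_fixed _
  · rw [if_neg h]
    simp only []
    rw [show ((PySem.List.pyRange 0 n 1).map (fun _ => (PySem.List.pyRange 0 m 1).map (fun _ => (0 : Int))))
          = pvGrid n m (fun _ _ => 0) from rfl]
    rw [foldl_sweepB0]
    unfold pvGrid
    rw [List.foldl_map]
    apply PySem.List.foldl_congr_mem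
    intro total r _
    dsimp only
    rw [List.foldl_map]
    apply PySem.List.foldl_congr_mem
    intro total c _
    dsimp only
    simp only [cell_count_eq n m arr r c]

-- ===== VERDICT (by name: the statement is the Claim_ definition above) =====
theorem solve_spec : Claim_equal_solve := by
  intro n m arr _ _
  unfold Spec_solve
  exact solve_spec_aux n m arr
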